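-- pv_equiv track=rewrite | github.com/mulinfro/pysh | libs/function_tools.py | joinDict
-- ===== SOURCE A (Python) =====
-- def joinDict(dict1, dict2):
--     """
--       joinDict(dict1: dict, dict2: dict)
--           jion two dict, return a new dict
--
--       args:
--           dict1 = {1:1, 2:2};  dict2 = {2:2, 3:3}
--       return a dict 不存在的用None代替
--           {1: (1, None), 2: (2, 2), 3: (None, 3)}
--     """
--     ans = {}
--     for k,v in dict1.items():
--         ans[k] = (v, None)
--     for k,v in dict2.items():
--         l1v = ans[k][0] if k in ans else None
--         ans[k] = (l1v, v)
--     return ans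
-- ===== SOURCE B (Python) =====
-- def joinDict(dict1, dict2):
--     both = [(k, (v, dict2.get(k))) for k, v in dict1.items()]
--     only2 = [(k, (None, v)) for k, v in dict2.items() if k not in dict1]
--     return dict(both + only2)
-- ===== Notes on version B (the rewrite author's own statement) =====
-- stated objective: alternative
-- what changed: A builds a mutable dict accumulator in two stateful phases (populate from dict1, then read back and overwrite each tuple while looping over dict2); B never mutates: it assembles the output directly as the concatenation of two list comprehensions driven by the items themselves (dict1 items paired with a dict2 lookup, then dict2-only items), and turns that list into a dict once.
import Mathlib
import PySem

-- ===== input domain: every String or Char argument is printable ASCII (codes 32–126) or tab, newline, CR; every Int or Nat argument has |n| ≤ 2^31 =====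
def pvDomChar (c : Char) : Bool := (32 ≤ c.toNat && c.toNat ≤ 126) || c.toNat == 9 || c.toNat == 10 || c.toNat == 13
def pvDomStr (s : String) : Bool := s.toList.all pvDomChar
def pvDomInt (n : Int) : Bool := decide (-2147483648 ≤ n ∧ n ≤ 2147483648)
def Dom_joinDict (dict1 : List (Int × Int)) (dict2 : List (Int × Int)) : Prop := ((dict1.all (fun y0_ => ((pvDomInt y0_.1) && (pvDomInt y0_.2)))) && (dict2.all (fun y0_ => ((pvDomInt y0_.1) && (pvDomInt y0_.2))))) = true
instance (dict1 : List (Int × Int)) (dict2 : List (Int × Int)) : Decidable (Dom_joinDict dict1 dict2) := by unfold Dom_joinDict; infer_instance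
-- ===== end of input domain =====

-- B assembles the result directly as the concatenation of two list comprehensions streamed off
-- the items (dict1 items annotated, then dict2-only items), instead of A's mutable
-- populate-then-overwrite dict accumulator (alternative decomposition, same cost).


-- ===== PORT A =====
def joinDict (dict1 : List (Int × Int)) (dict2 : List (Int × Int)) : List (Int × Option Int × Option Int) :=
  let d1 := PySem.Dict.ofList dict1
  let d2 := PySem.Dict.ofList dict2
  -- ans = {}; for k,v in dict1.items(): ans[k] = (v, None)
  let ans : PySem.Dict Int (Option Int × Option Int) :=
    d1.items.foldl (fun ans p => ans.insert p.1 (some p.2, none)) PySem.Dict.empty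
  -- for k,v in dict2.items(): l1v = ans[k][0] if k in ans else None; ans[k] = (l1v, v)
  let ans :=
    d2.items.foldl (fun ans p =>
      let l1v := if ans.contains p.1 then (ans.getD p.1 (none, none)).1 else none
      ans.insert p.1 (l1v, some p.2)) ans
  ans.items

-- ===== PORT B =====
def joinDict_alt (dict1 : List (Int × Int)) (dict2 : List (Int × Int)) : List (Int × Option Int × Option Int) :=
  let d1 := PySem.Dict.ofList dict1
  let d2 := PySem.Dict.ofList dict2
  -- both = [(k, (v, dict2.get(k))) for k, v in dict1.items()]
  let both := d1.items.map (fun p => (p.1, (some p.2, d2.get? p.1)))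
  -- only2 = [(k, (None, v)) for k, v in dict2.items() if k not in dict1]
  let only2 := (d2.items.filter (fun p => !(d1.contains p.1))).map
      (fun p => (p.1, ((none : Option Int), some p.2)))
  -- dict(both + only2)
  (PySem.Dict.ofList (both ++ only2)).items

-- ===== PRECONDITION & SPEC =====
def Spec_joinDict (dict1 : List (Int × Int)) (dict2 : List (Int × Int)) (out : List (Int × Option Int × Option Int)) : Prop := out = joinDict_alt dict1 dict2
instance (dict1 : List (Int × Int)) (dict2 : List (Int × Int)) (out : List (Int × Option Int × Option Int)) : Decidable (Spec_joinDict dict1 dict2 out) := by unfold Spec_joinDict; infer_instance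

-- ===== CLAIM =====
def Claim_equal_joinDict : Prop := ∀ (dict1 : List (Int × Int)) (dict2 : List (Int × Int)), Dom_joinDict dict1 dict2 → Spec_joinDict dict1 dict2 (joinDict dict1 dict2)

-- ===== LEMMAS AND PROOFS =====

-- last-match lookup accumulated over a pair list, starting from a default function g
def pvLook (g : Int → Option Int) : List (Int × Int) → Int → Option Int
  | [], k => g k
  | p :: t, k => pvLook (fun x => if x = p.1 then some p.2 else g x) t k

-- on a list with distinct keys, pvLook is first-match lookup with fallback g
lemma pvLook_eq_get? (r : List (Int × Int)) : ∀ (g : Int → Option Int) (k : Int),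
    (r.map (·.1)).Nodup →
    pvLook g r k = ((PySem.Dict.mk r).get? k).or (g k) := by
  induction r with
  | nil =>
      intro g k _
      simp [pvLook, PySem.Dict.get?, Option.or]
  | cons p t ih =>
      intro g k hnd
      simp only [List.map_cons, List.nodup_cons] at hnd
      rw [pvLook, ih _ k hnd.2, PySem.Dict.get?_mk_cons]
      by_cases hk : p.1 = k
      · subst hk
        have : (PySem.Dict.mk t).get? p.1 = none := by
          rw [PySem.Dict.get?_eq_none_iff_not_mem_keys]
          simpa [PySem.Dict.keys] using hnd.1
        simp [this, Option.or]
      · have hk2 : ¬ k = p.1 := fun h => hk h.symm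
        simp [hk, hk2]

-- the second loop of A, characterised: items stay "keys annotated with (d1-lookup, running g)"
lemma pvLoop_items (d1 : PySem.Dict Int Int) (r : List (Int × Int)) :
    ∀ (ans : PySem.Dict Int (Option Int × Option Int)) (g : Int → Option Int),
    ans.keys.Nodup →
    (∀ k ∈ d1.keys, k ∈ ans.keys) →
    ans.items = ans.keys.map (fun k => (k, d1.get? k, g k)) →
    (r.foldl (fun ans p =>
        let l1v := if ans.contains p.1 then (ans.getD p.1 (none, none)).1 else none
        ans.insert p.1 (l1v, some p.2)) ans).items
      = (PySem.Set.update ans.keys (r.map (·.1))).map (fun k => (k, d1.get? k, pvLook g r k)) := by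
  induction r with
  | nil =>
      intro ans g _ _ hitems
      simpa [PySem.Set.update, pvLook] using hitems
  | cons p t ih =>
      intro ans g hnd hsub hitems
      simp only [List.foldl_cons, List.map_cons, PySem.Set.update_cons]
      by_cases hc : p.1 ∈ ans.keys
      · have hcontains : ans.contains p.1 = true :=
          (PySem.Dict.contains_iff_mem_keys ans p.1).2 hc
        have hmem : (p.1, d1.get? p.1, g p.1) ∈ ans.items := by
          rw [hitems]; exact List.mem_map.2 ⟨p.1, hc, rfl⟩
        have hgetD : ans.getD p.1 ((none : Option Int), (none : Option Int))
            = (d1.get? p.1, g p.1) := PySem.Dict.getD_of_mem_items ans hmem hnd _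
        have hkeys' : (ans.insert p.1 ((d1.get? p.1), some p.2)).keys = ans.keys :=
          PySem.Dict.keys_insert_of_contains ans _ hcontains
        have hitems' : (ans.insert p.1 ((d1.get? p.1), some p.2)).items
            = (ans.insert p.1 ((d1.get? p.1), some p.2)).keys.map (fun k => (k, d1.get? k,
                (fun x => if x = p.1 then some p.2 else g x) k)) := by
          rw [PySem.Dict.items_insert_of_contains ans _ hcontains, hitems, hkeys', List.map_map]
          refine List.map_congr_left ?_
          intro k _
          by_cases hk : k = p.1 <;> simp [hk]
        have hrec := ih (ans.insert p.1 ((d1.get? p.1), some p.2))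
            (fun x => if x = p.1 then some p.2 else g x)
            (PySem.Dict.nodup_keys_insert ans _ _ hnd)
            (by rw [hkeys']; exact hsub)
            hitems'
        simp only [hcontains, reduceIte, hgetD]
        rw [PySem.Set.add_of_mem hc]
        simp only [pvLook]
        rw [← hkeys']
        exact hrec
      · have hcontains : ans.contains p.1 = false := by
          rw [← Bool.not_eq_true]
          intro h
          exact hc ((PySem.Dict.contains_iff_mem_keys ans p.1).1 h)
        have hd1 : d1.get? p.1 = none := by
          rw [PySem.Dict.get?_eq_none_iff_not_mem_keys]
          intro h; exact hc (hsub _ h)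
        have hkeys' : (ans.insert p.1 ((none : Option Int), some p.2)).keys
            = ans.keys ++ [p.1] :=
          PySem.Dict.keys_insert_of_not_contains ans _ hcontains
        have hitems' : (ans.insert p.1 ((none : Option Int), some p.2)).items
            = (ans.insert p.1 ((none : Option Int), some p.2)).keys.map (fun k => (k, d1.get? k,
                (fun x => if x = p.1 then some p.2 else g x) k)) := by
          rw [PySem.Dict.items_insert_of_not_contains ans _ hcontains, hitems, hkeys',
            List.map_append]
          congr 1
          · refine List.map_congr_left ?_
            intro k hk
            have hkp : ¬ k = p.1 := fun h => hc (h ▸ hk)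
            simp [hkp]
          · simp [hd1]
        have hrec := ih (ans.insert p.1 ((none : Option Int), some p.2))
            (fun x => if x = p.1 then some p.2 else g x)
            (PySem.Dict.nodup_keys_insert ans _ _ hnd)
            (by rw [hkeys']; intro k hk; exact List.mem_append_left _ (hsub _ hk))
            hitems'
        simp only [hcontains, Bool.false_eq_true, reduceIte]
        rw [PySem.Set.add_of_not_mem hc]
        simp only [pvLook]
        rw [← hkeys']
        exact hrec

-- dict(l) on a list with distinct keys reproduces l as items
lemma pvItems_ofList {β : Type} (l : List (Int × β)) (h : (l.map Prod.fst).Nodup) :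
    (PySem.Dict.ofList l).items = l := by
  unfold PySem.Dict.ofList
  have := PySem.Dict.items_foldl_insert_fresh (l := l) (k := Prod.fst) (v := Prod.snd)
      (d := PySem.Dict.empty) (by intro a _; exact PySem.Dict.contains_empty a.1) h
  simpa using this

-- ===== VERDICT =====
theorem joinDict_spec : Claim_equal_joinDict := by
  intro dict1 dict2 _
  unfold Spec_joinDict joinDict joinDict_alt
  set d1 := PySem.Dict.ofList dict1 with hd1
  set d2 := PySem.Dict.ofList dict2 with hd2
  have hnd1 : d1.keys.Nodup := PySem.Dict.nodup_keys_ofList dict1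
  have hnd2 : d2.keys.Nodup := PySem.Dict.nodup_keys_ofList dict2
  -- A's first loop builds d1's items annotated with (some v, none)
  have hbase : (d1.items.foldl (fun ans p => ans.insert p.1 (some p.2, none))
      (PySem.Dict.empty : PySem.Dict Int (Option Int × Option Int))).items
      = d1.items.map (fun a => (a.1, some a.2, none)) := by
    have := PySem.Dict.items_foldl_insert_fresh (l := d1.items)
        (k := fun a => a.1) (v := fun a => ((some a.2 : Option Int), (none : Option Int)))
        (d := PySem.Dict.empty)
        (by intro a _; exact PySem.Dict.contains_empty a.1) hnd1
    simpa [PySem.Dict.items] using this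
  set base := d1.items.foldl (fun ans p => ans.insert p.1 (some p.2, none))
      (PySem.Dict.empty : PySem.Dict Int (Option Int × Option Int)) with hbasedef
  have hbkeys : base.keys = d1.keys := by
    show base.items.map (·.1) = d1.items.map (·.1)
    rw [hbase, List.map_map]
    rfl
  have hbitems : base.items = base.keys.map (fun k => (k, d1.get? k, (fun _ => none) k)) := by
    rw [hbase, hbkeys]
    show _ = (d1.items.map (·.1)).map _
    rw [List.map_map]
    refine List.map_congr_left ?_
    intro a ha
    have : d1.get? a.1 = some a.2 := PySem.Dict.get?_of_mem_items d1 (by exact ha) hnd1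
    simp [this]
  rw [pvLoop_items d1 d2.items base (fun _ => none)
      (by rw [hbkeys]; exact hnd1)
      (by rw [hbkeys]; exact fun k hk => hk) hbitems]
  rw [hbkeys]
  -- A's items = (d1.keys ++ new d2 keys).map (k, d1.get? k, d2.get? k)
  have hlook : ∀ k ∈ PySem.Set.update d1.keys (d2.items.map (·.1)),
      (k, d1.get? k, pvLook (fun _ => none) d2.items k) = (k, d1.get? k, d2.get? k) := by
    intro k _
    have hnd2' : (d2.items.map (·.1)).Nodup := hnd2
    have := pvLook_eq_get? d2.items (fun _ => none) k hnd2'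
    have hd2get : (PySem.Dict.mk d2.items).get? k = d2.get? k := rfl
    rw [hd2get] at this
    cases h2 : d2.get? k <;> simp_all [Option.or]
  rw [List.map_congr_left hlook]
  -- B's dict(both + only2) has distinct keys, so its items are both ++ only2
  have hfk : ((d2.items.filter (fun p => !(d1.contains p.1))).map
      (fun p => (p.1, ((none : Option Int), some p.2)))).map Prod.fst
      = (d2.items.map (·.1)).filter (fun y => !(PySem.Set.contains d1.keys y)) := by
    have hf : d2.items.filter (fun p => !(d1.contains p.1))
        = d2.items.filter ((fun y => !(PySem.Set.contains d1.keys y)) ∘ (fun x => x.1)) := by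
      refine List.filter_congr ?_
      intro p _
      simp [PySem.Dict.contains_eq_decide_mem_keys, Function.comp]
    rw [List.map_map, List.filter_map, hf]
    rfl
  have hbothk : (d1.items.map (fun p => (p.1, (some p.2, d2.get? p.1)))).map Prod.fst
      = d1.keys := by
    rw [List.map_map]; rfl
  have hndcat : (((d1.items.map (fun p => (p.1, (some p.2, d2.get? p.1)))) ++
      ((d2.items.filter (fun p => !(d1.contains p.1))).map
        (fun p => (p.1, ((none : Option Int), some p.2))))).map Prod.fst).Nodup := by
    rw [List.map_append, hbothk, hfk]
    refine List.Nodup.append hnd1 (List.Nodup.filter _ hnd2) ?_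
    intro k hk1 hk2
    have := List.of_mem_filter hk2
    simp only [Bool.not_eq_true', PySem.Set.contains_eq_listContains] at this
    exact absurd (List.elem_eq_true_of_mem hk1) (by simpa using this)
  rw [pvItems_ofList _ hndcat]
  -- split the key list and match the two halves
  have hupd : PySem.Set.update d1.keys (d2.items.map (·.1))
      = d1.keys ++ (d2.items.map (·.1)).filter (fun y => !(PySem.Set.contains d1.keys y)) := by
    rw [PySem.Set.update_eq_append_filter,
      PySem.Set.ofList_eq_self_of_nodup _
        (show (List.map (fun x => x.1) d2.items).Nodup from hnd2)]
  rw [hupd, List.map_append]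
  congr 1
  · -- first half: d1.keys mapped = both
    have : d1.items = d1.keys.map (fun k => (k, d1.getD k 0)) :=
      PySem.Dict.items_eq_map_keys d1 hnd1 0
    rw [this, List.map_map]
    refine List.map_congr_left ?_
    intro k hk
    have hmem : (k, d1.getD k 0) ∈ d1.items := by
      rw [this]; exact List.mem_map.2 ⟨k, hk, rfl⟩
    have : d1.get? k = some (d1.getD k 0) := PySem.Dict.get?_of_mem_items d1 hmem hnd1
    simp [this]
  · -- second half: new d2 keys mapped = only2
    rw [← hfk]
    simp only [List.map_map]
    refine List.map_congr_left ?_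
    intro p hp
    have hpd2 : p ∈ d2.items := List.mem_of_mem_filter hp
    have hnc := List.of_mem_filter hp
    simp only [Bool.not_eq_true'] at hnc
    have h1 : d1.get? p.1 = none := by
      rw [PySem.Dict.get?_eq_none_iff_not_mem_keys]
      intro h
      rw [PySem.Dict.contains_eq_decide_mem_keys] at hnc
      simp [h] at hnc
    have h2 : d2.get? p.1 = some p.2 := PySem.Dict.get?_of_mem_items d2 hpd2 hnd2
    simp [Function.comp, h1, h2]
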